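-- pv_equiv track=rewrite | github.com/kckagancan/CMPE-150 | Image Processing Project/Main.py | misalign
-- ===== SOURCE A (Python) =====
-- def misalign(img_matrix):
--
--     HEIGHT = len(img_matrix)
--
--     for i in range(1, len(img_matrix[0]), 2):
--         for j in range(HEIGHT//2):
--             temp = img_matrix[j][i]
--             img_matrix[j][i] = img_matrix[HEIGHT - 1 - j][i]
--             img_matrix[HEIGHT - 1 - j][i] = temp
--
--     return img_matrix
-- ===== SOURCE B (Python) =====
-- def misalign(img_matrix):
--     # Reverse each odd column: extract it, reverse, write it back.
--     for i in range(1, len(img_matrix[0]), 2):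
--         col = [row[i] for row in img_matrix]
--         col.reverse()
--         for row, v in zip(img_matrix, col):
--             row[i] = v
--     return img_matrix
-- ===== Notes on version B (the rewrite author's own statement) =====
-- stated objective: simpler
-- what changed: A reverses each odd column in place with nested top/bottom swap loops over half the height; B extracts each odd column as a list, reverses it, and writes it back with zip. Pre_ excludes ragged matrices whose middle row (odd height) is shorter than an odd column index: A never touches the middle row there (j runs to HEIGHT//2) and returns, while B's column extraction raises IndexError.
-- outside the precondition, e.g. on misalign([[1, 2], [0], [3, 4]]): A returns [[1, 4], [0], [3, 2]], B raises IndexError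
import Mathlib
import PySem

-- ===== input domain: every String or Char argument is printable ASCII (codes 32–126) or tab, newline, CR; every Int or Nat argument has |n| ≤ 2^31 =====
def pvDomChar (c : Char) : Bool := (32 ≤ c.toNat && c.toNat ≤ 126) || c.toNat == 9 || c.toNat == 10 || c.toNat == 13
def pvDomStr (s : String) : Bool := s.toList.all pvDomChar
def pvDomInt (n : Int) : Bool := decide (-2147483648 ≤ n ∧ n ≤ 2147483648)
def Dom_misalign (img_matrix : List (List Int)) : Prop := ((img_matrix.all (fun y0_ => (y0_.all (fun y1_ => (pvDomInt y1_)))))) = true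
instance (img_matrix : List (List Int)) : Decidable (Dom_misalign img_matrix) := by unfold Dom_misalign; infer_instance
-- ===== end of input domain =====

-- B reverses each odd column by extracting it, reversing the list and writing it
-- back, instead of A's nested top/bottom swap loops (objective: simpler).  Both
-- mutate img_matrix in place in Python; the equivalence proved here is about the
-- RETURN value.

-- ===== PORT A =====
-- img_matrix[j][i] = v  (j, i are the in-range non-negative loop indices of A)
def pvSetEntry (m : List (List Int)) (j i : Nat) (v : Int) : List (List Int) :=
  m.set j ((m.getD j []).set i v)

-- one iteration of A's inner loop body (the three swap statements, in order)
def pvSwap (H i : Nat) (acc : List (List Int)) (j : Nat) : List (List Int) :=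
  let temp := (acc.getD j []).getD i 0
  let acc1 := pvSetEntry acc j i ((acc.getD (H - 1 - j) []).getD i 0)
  pvSetEntry acc1 (H - 1 - j) i temp

-- 'for j in range(HEIGHT//2): …' ; range(n) over naturals, exact
def pvSwapCol (H i : Nat) (m : List (List Int)) : List (List Int) :=
  (List.range (H / 2)).foldl (pvSwap H i) m

def misalign (img_matrix : List (List Int)) : List (List Int) :=
  let HEIGHT := img_matrix.length
  (PySem.List.pyRange 1 ((img_matrix.headD []).length : Int) 2).foldl
    (fun acc i => pvSwapCol HEIGHT i.toNat acc) img_matrix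

-- ===== PORT B =====
-- one iteration of B's outer loop: col = [row[i] for row in acc]; col.reverse();
-- for row, v in zip(acc, col): row[i] = v.  The reads row[i] use pyGetD (Python
-- raises out of range; Pre_ keeps every access in range, where it is exact).
def pvColStep (acc : List (List Int)) (i : Int) : List (List Int) :=
  let col := acc.map (fun row => PySem.List.pyGetD row i 0)
  (acc.zip col.reverse).map (fun p => p.1.set i.toNat p.2)

def misalign_alt (img_matrix : List (List Int)) : List (List Int) :=
  (PySem.List.pyRange 1 ((img_matrix.headD []).length : Int) 2).foldl
    pvColStep img_matrix

-- ===== PRECONDITION & SPEC =====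
-- Pre_ is the natural domain: a nonempty matrix every one of whose rows has all
-- odd column indices of row 0 in range (rectangular images qualify).  It excludes
-- inputs where A raises IndexError (empty matrix, a touched row too short) and
-- ragged matrices whose middle row (odd height) is shorter than an odd column
-- index: there A never touches the middle row (j runs to HEIGHT//2) and returns, while
-- B's column extraction raises IndexError.
def Pre_misalign (img_matrix : List (List Int)) : Prop :=
  img_matrix ≠ [] ∧ ∀ r ∈ img_matrix,
    ∀ i, i < (img_matrix.headD []).length → i % 2 = 1 → i < r.length
instance (img_matrix : List (List Int)) : Decidable (Pre_misalign img_matrix) := by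
  unfold Pre_misalign; infer_instance
def pvWitness_misalign : List (List Int) := [[1, 2], [3, 4]]

def Spec_misalign (img_matrix : List (List Int)) (out : List (List Int)) : Prop := out = misalign_alt img_matrix
instance (img_matrix : List (List Int)) (out : List (List Int)) : Decidable (Spec_misalign img_matrix out) := by unfold Spec_misalign; infer_instance

-- ===== CLAIM (what is proved, stated in full; the proofs are below) =====
def Claim_equal_misalign : Prop := ∀ (img_matrix : List (List Int)), Dom_misalign img_matrix → Pre_misalign img_matrix → Spec_misalign img_matrix (misalign img_matrix)

-- ===== LEMMAS AND PROOFS =====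

-- entry (k,i) of the matrix, 0 outside
def pvE (m : List (List Int)) (k i : Nat) : Int := (m.getD k []).getD i 0

theorem pvE_setEntry (m : List (List Int)) (j i : Nat) (v : Int) (k i' : Nat) :
    pvE (pvSetEntry m j i v) k i' =
      if k = j ∧ i' = i ∧ j < m.length ∧ i < (m.getD j []).length then v
      else pvE m k i' := by
  unfold pvE pvSetEntry
  by_cases hk : k = j
  · subst hk
    by_cases hj : k < m.length
    · have hrow : m.getD k [] = m[k] := List.getD_eq_getElem _ _ hj
      have hset : (m.set k (m[k].set i v)).getD k [] = m[k].set i v := by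
        rw [List.getD_eq_getElem _ _ (by simpa using hj)]
        simp
      rw [hrow, hset]
      have hlen : ∀ w : Int, (m[k].set i w).length = m[k].length := fun w => List.length_set
      by_cases hi : i' = i
      · subst hi
        by_cases hiw : i' < m[k].length
        · rw [if_pos ⟨rfl, rfl, hj, hiw⟩,
            List.getD_eq_getElem _ _ (show i' < (m[k].set i' v).length by rw [hlen]; omega),
            List.getElem_set_self (show i' < (m[k].set i' v).length by rw [hlen]; omega)]
        · rw [if_neg (fun h => hiw h.2.2.2),
            List.getD_eq_default _ _ (show (m[k].set i' v).length ≤ i' by rw [hlen]; omega),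
            List.getD_eq_default _ _ (by omega)]
      · rw [if_neg (fun h => hi h.2.1)]
        rw [List.getD_eq_getElem?_getD, List.getElem?_set,
          if_neg (fun h => hi h.symm), ← List.getD_eq_getElem?_getD]
    · rw [if_neg (fun h => hj h.2.2.1)]
      rw [List.set_eq_of_length_le (by omega)]
  · rw [if_neg (fun h => hk h.1)]
    have h2 : (m.set j ((m.getD j []).set i v)).getD k [] = m.getD k [] := by
      rw [List.getD_eq_getElem?_getD, List.getElem?_set,
        if_neg (fun h => hk h.symm), ← List.getD_eq_getElem?_getD]
    rw [h2]

theorem pvSetEntry_length (m : List (List Int)) (j i : Nat) (v : Int) :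
    (pvSetEntry m j i v).length = m.length := by
  simp [pvSetEntry]

theorem pvLen_setEntry (m : List (List Int)) (j i : Nat) (v : Int) (k : Nat) :
    ((pvSetEntry m j i v).getD k []).length = (m.getD k []).length := by
  unfold pvSetEntry
  by_cases hk : k = j
  · subst hk
    by_cases hj : k < m.length
    · have hset : (m.set k ((m.getD k []).set i v)).getD k [] = (m.getD k []).set i v := by
        rw [List.getD_eq_getElem _ _ (by simpa using hj)]
        simp
      rw [hset, List.length_set]
    · rw [List.set_eq_of_length_le (by omega)]
  · rw [List.getD_eq_getElem?_getD, List.getElem?_set,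
      if_neg (fun h => hk h.symm), ← List.getD_eq_getElem?_getD]

theorem pvSwap_len (H i : Nat) (acc : List (List Int)) (j k : Nat) :
    ((pvSwap H i acc j).getD k []).length = (acc.getD k []).length := by
  show ((pvSetEntry (pvSetEntry acc j i _) (H - 1 - j) i _).getD k []).length = _
  rw [pvLen_setEntry, pvLen_setEntry]

theorem pvE_swap {acc : List (List Int)} {H : Nat} (hlen : acc.length = H)
    (i j k i' : Nat) :
    pvE (pvSwap H i acc j) k i' =
      if k = H - 1 - j ∧ i' = i ∧ H - 1 - j < H ∧ i < (acc.getD (H - 1 - j) []).length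
        then pvE acc j i
      else if k = j ∧ i' = i ∧ j < H ∧ i < (acc.getD j []).length
        then pvE acc (H - 1 - j) i
      else pvE acc k i' := by
  show pvE (pvSetEntry (pvSetEntry acc j i ((acc.getD (H - 1 - j) []).getD i 0))
      (H - 1 - j) i ((acc.getD j []).getD i 0)) k i' = _
  rw [pvE_setEntry, pvE_setEntry, pvSetEntry_length, pvLen_setEntry, hlen]
  rfl

theorem foldSwap_length (H i : Nat) :
    ∀ (L : List Nat) (m : List (List Int)),
      (L.foldl (pvSwap H i) m).length = m.length := by
  intro L
  induction L with
  | nil => intro m; rfl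
  | cons a L ih =>
    intro m
    rw [List.foldl_cons, ih]
    show (pvSetEntry _ _ _ _).length = _
    rw [pvSetEntry_length, pvSetEntry_length]

theorem foldSwap_len (H i : Nat) :
    ∀ (L : List Nat) (m : List (List Int)) (k : Nat),
      ((L.foldl (pvSwap H i) m).getD k []).length = (m.getD k []).length := by
  intro L
  induction L with
  | nil => intro m k; rfl
  | cons a L ih =>
    intro m k
    rw [List.foldl_cons, ih, pvSwap_len]

theorem pvE_foldSwap {H : Nat} (i : Nat) :
    ∀ (t : Nat), t ≤ H / 2 →
    ∀ (m : List (List Int)), m.length = H →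
    (∀ j, j < H → 2 * j + 1 = H ∨ i < (m.getD j []).length) →
    ∀ (k i' : Nat),
    pvE ((List.range t).foldl (pvSwap H i) m) k i' =
      if i' = i ∧ k < H ∧ (k < t ∨ H - 1 - k < t) then pvE m (H - 1 - k) i
      else pvE m k i' := by
  intro t
  induction t with
  | zero =>
    intro _ m hlen hcol k i'
    simp
  | succ t ih =>
    intro ht m hlen hcol k i'
    rw [List.range_succ, List.foldl_append, List.foldl_cons, List.foldl_nil]
    have hlen' : ((List.range t).foldl (pvSwap H i) m).length = H := by
      rw [foldSwap_length, hlen]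
    rw [pvE_swap hlen' i t k i', foldSwap_len H i _ m (H - 1 - t),
      foldSwap_len H i _ m t,
      ih (by omega) m hlen hcol t i, ih (by omega) m hlen hcol (H - 1 - t) i,
      ih (by omega) m hlen hcol k i']
    have hA : i < (m.getD (H - 1 - t) []).length := by
      rcases hcol (H - 1 - t) (by omega) with h | h
      · omega
      · exact h
    have hB : i < (m.getD t []).length := by
      rcases hcol t (by omega) with h | h
      · omega
      · exact h
    split_ifs <;> first | rfl | omega | (congr 1; omega)

theorem pvE_swapCol {m : List (List Int)} {H : Nat} (hlen : m.length = H)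
    (i : Nat) (hcol : ∀ j, j < H → 2 * j + 1 = H ∨ i < (m.getD j []).length)
    (k i' : Nat) :
    pvE (pvSwapCol H i m) k i' =
      if i' = i ∧ k < H then pvE m (H - 1 - k) i else pvE m k i' := by
  unfold pvSwapCol
  rw [pvE_foldSwap i (H / 2) le_rfl m hlen hcol k i']
  by_cases h1 : i' = i ∧ k < H
  · obtain ⟨e1, e2⟩ := h1
    by_cases h2 : k < H / 2 ∨ H - 1 - k < H / 2
    · rw [if_pos ⟨e1, e2, h2⟩, if_pos ⟨e1, e2⟩]
    · rw [if_neg (by tauto), if_pos ⟨e1, e2⟩]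
      have e3 : k = H - 1 - k := by omega
      rw [e1, ← e3]
  · rw [if_neg (by tauto), if_neg h1]

theorem pvSwapCol_length (H i : Nat) (m : List (List Int)) :
    (pvSwapCol H i m).length = m.length :=
  foldSwap_length H i _ m

theorem pvSwapCol_len (H i : Nat) (m : List (List Int)) (k : Nat) :
    ((pvSwapCol H i m).getD k []).length = (m.getD k []).length :=
  foldSwap_len H i _ m k

theorem pvE_eq_getElem {m : List (List Int)} {k i : Nat}
    (hk : k < m.length) (hi : i < m[k].length) : pvE m k i = m[k][i] := by
  unfold pvE
  rw [List.getD_eq_getElem m _ hk, List.getD_eq_getElem _ _ hi]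

-- B's step: row k of the result, explicitly
theorem pvColStep_length (acc : List (List Int)) (i : Int) :
    (pvColStep acc i).length = acc.length := by
  simp [pvColStep]

theorem pvColStep_getElem (acc : List (List Int)) (i : Int) (k : Nat)
    (hk : k < acc.length) :
    (pvColStep acc i)[k]'(by rw [pvColStep_length]; exact hk) =
      acc[k].set i.toNat
        (PySem.List.pyGetD (acc[acc.length - 1 - k]'(by omega)) i 0) := by
  unfold pvColStep
  rw [List.getElem_map, List.getElem_zip, List.getElem_reverse, List.getElem_map]
  congr 2
  simp

-- B's step coincides with A's column pass when every row has column i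
theorem pvColStep_eq_swapCol {acc : List (List Int)} {H : Nat}
    (hlen : acc.length = H) (i : Int) (hi : 0 ≤ i)
    (hcol : ∀ j, j < H → i.toNat < (acc.getD j []).length) :
    pvColStep acc i = pvSwapCol H i.toNat acc := by
  apply List.ext_getElem
  · rw [pvColStep_length, pvSwapCol_length]
  · intro k h1 h2
    have hk : k < acc.length := by rwa [pvColStep_length] at h1
    have hkH : k < H := by omega
    have hmir : H - 1 - k < H := by omega
    have hmir' : H - 1 - k < acc.length := by omega
    rw [pvColStep_getElem acc i k hk]
    have hgd : ∀ j (hj : j < acc.length), acc.getD j [] = acc[j] := fun j hj =>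
      List.getD_eq_getElem _ _ hj
    have hv : PySem.List.pyGetD (acc[acc.length - 1 - k]'(by omega)) i 0 =
        pvE acc (H - 1 - k) i.toNat := by
      rw [PySem.List.pyGetD_of_nonneg _ _ hi]
      unfold pvE
      rw [hgd (H - 1 - k) hmir']
      congr 2
      omega
    rw [hv]
    have lrow : (pvSwapCol H i.toNat acc)[k].length = acc[k].length := by
      have p := pvSwapCol_len H i.toNat acc k
      rwa [List.getD_eq_getElem _ _ h2, hgd k hk] at p
    apply List.ext_getElem
    · rw [List.length_set, lrow]
    · intro i' hi1 hi2
      have hi'k : i' < acc[k].length := by simpa using hi1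
      have hrhs : (pvSwapCol H i.toNat acc)[k][i'] = pvE (pvSwapCol H i.toNat acc) k i' :=
        (pvE_eq_getElem h2 hi2).symm
      rw [hrhs, pvE_swapCol hlen i.toNat (fun j hj => Or.inr (hcol j hj)) k i',
        List.getElem_set]
      by_cases he : i.toNat = i'
      · rw [if_pos he, if_pos ⟨he.symm, hkH⟩]
      · rw [if_neg he, if_neg (fun h => he h.1.symm), pvE_eq_getElem hk hi'k]

-- both folds agree step by step (lengths are invariant, so the column
-- condition persists along the fold)
theorem foldB_eq (H : Nat) :
    ∀ (L : List Int) (acc : List (List Int)), acc.length = H →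
    (∀ x ∈ L, 0 ≤ x) →
    (∀ x ∈ L, ∀ j, j < H → x.toNat < (acc.getD j []).length) →
    L.foldl pvColStep acc = L.foldl (fun a x => pvSwapCol H x.toNat a) acc := by
  intro L
  induction L with
  | nil => intro acc _ _ _; rfl
  | cons a L ih =>
    intro acc hlen hpos hcol
    rw [List.foldl_cons, List.foldl_cons,
      pvColStep_eq_swapCol hlen a (hpos a List.mem_cons_self)
        (hcol a List.mem_cons_self)]
    apply ih
    · rw [pvSwapCol_length, hlen]
    · intro x hx; exact hpos x (List.mem_cons_of_mem a hx)
    · intro x hx j hj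
      rw [pvSwapCol_len]
      exact hcol x (List.mem_cons_of_mem a hx) j hj

-- ===== VERDICT (by name: the statement is the Claim_ definition above) =====
theorem misalign_spec : Claim_equal_misalign := by
  intro m _ hpre
  unfold Spec_misalign misalign misalign_alt
  have hcol : ∀ x ∈ PySem.List.pyRange 1 ((m.headD []).length : Int) 2,
      ∀ j, j < m.length → x.toNat < (m.getD j []).length := by
    intro x hx j hj
    have hxr := (PySem.List.mem_pyRange_iff_of_pos (by norm_num) x).mp hx
    have hmem : m.getD j [] ∈ m := by
      rw [List.getD_eq_getElem _ _ hj]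
      exact List.getElem_mem hj
    exact hpre.2 (m.getD j []) hmem x.toNat (by omega) (by omega)
  have hpos : ∀ x ∈ PySem.List.pyRange 1 ((m.headD []).length : Int) 2, 0 ≤ x := by
    intro x hx
    have := (PySem.List.mem_pyRange_iff_of_pos (by norm_num) x).mp hx
    omega
  exact (foldB_eq m.length _ m rfl hpos hcol).symm
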